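-- pv_equiv track=rewrite | github.com/cindeboss/travel-cost | scripts/utils/date_matcher.py | find_matching_roster_file
-- ===== SOURCE A (Python) =====
-- from typing import Tuple, Optional, Dict
--
-- def find_matching_roster_file(
--     travel_month: str,
--     available_rosters: Dict[str, str]
-- ) -> Optional[str]:
--     """
--     根据商旅数据的归属月份，查找匹配的花名册文件
--
--     Args:
--         travel_month: 商旅数据归属月份 (YYYY-MM)
--         available_rosters: 可用的花名册字典 {月份: 文件名}
--
--     Returns:
--         匹配的花名册文件名，如果没有找到则返回None
--     """
--     # 精确匹配
--     if travel_month in available_rosters: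
--         return available_rosters[travel_month]
--
--     # 尝试找最近的月份（优先找当月或前一个月）
--     travel_year, travel_month_int = map(int, travel_month.split('-'))
--
--     # 优先找当月
--     if travel_month in available_rosters:
--         return available_rosters[travel_month]
--
--     # 找前一个月
--     if travel_month_int > 1:
--         prev_month = f'{travel_year}-{travel_month_int - 1:02d}'
--         if prev_month in available_rosters:
--             return available_rosters[prev_month]
--
--     # 找后一个月
--     if travel_month_int < 12:
--         next_month = f'{travel_year}-{travel_month_int + 1:02d}'
--         if next_month in available_rosters:
--             return available_rosters[next_month]
--
--     # 找最近的可用的月份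
--     if available_rosters:
--         # 按月份排序，找最近的
--         sorted_months = sorted(available_rosters.keys())
--         for m in sorted_months:
--             if m <= travel_month:
--                 return available_rosters[m]
--
--         # 如果都比目标月份早，返回最新的
--         return available_rosters[sorted_months[-1]]
--
--     return None
-- ===== SOURCE B (Python) =====
-- def find_matching_roster_file(travel_month, available_rosters):
--     # exact match
--     hit = available_rosters.get(travel_month)
--     if hit is not None:
--         return hit
--
--     year, month = map(int, travel_month.split('-'))
--
--     # previous month
--     if month > 1:
--         hit = available_rosters.get(f'{year}-{month - 1:02d}')
--         if hit is not None:
--             return hit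
--
--     # next month
--     if month < 12:
--         hit = available_rosters.get(f'{year}-{month + 1:02d}')
--         if hit is not None:
--             return hit
--
--     if not available_rosters:
--         return None
--
--     # fallback without sorting: the smallest key <= travel_month wins
--     # (it is the first qualifying key in sorted order), else the largest key.
--     lo = min(available_rosters)
--     if lo <= travel_month:
--         return available_rosters[lo]
--     return available_rosters[max(available_rosters)]
-- ===== Notes on version B (the rewrite author's own statement) =====
-- stated objective: simpler
-- what changed: The fallback no longer sorts all roster months and scans them: it computes min and max of the keys directly (smallest key <= travel_month, else the largest key), and guard lookups use dict.get instead of membership-then-index.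
import Mathlib
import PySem

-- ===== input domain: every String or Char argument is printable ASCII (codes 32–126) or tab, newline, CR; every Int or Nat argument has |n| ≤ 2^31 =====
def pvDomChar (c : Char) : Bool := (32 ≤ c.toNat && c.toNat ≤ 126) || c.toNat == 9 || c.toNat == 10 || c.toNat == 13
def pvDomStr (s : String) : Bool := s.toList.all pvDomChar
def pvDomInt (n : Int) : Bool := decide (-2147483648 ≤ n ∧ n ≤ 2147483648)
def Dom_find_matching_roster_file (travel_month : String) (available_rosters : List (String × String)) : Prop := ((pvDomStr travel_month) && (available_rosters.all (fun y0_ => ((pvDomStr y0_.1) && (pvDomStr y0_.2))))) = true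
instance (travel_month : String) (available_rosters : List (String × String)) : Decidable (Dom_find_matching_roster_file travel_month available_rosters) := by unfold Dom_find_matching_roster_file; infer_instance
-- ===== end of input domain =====

-- B replaces A's sort-then-scan fallback by direct min/max of the roster keys (simpler, no sort); guard lookups unchanged.


-- ===== PORT A =====
-- f'{year}-{month:02d}' ( :02d on an int equals str(m).zfill(2) )
def pvFmtA (y m : Int) : String :=
  PySem.Str.join "" [PySem.Int.toStr y, "-", PySem.Str.zfill (PySem.Int.toStr m) 2]

-- A's fallback loop: for m in sorted_months: if m <= travel_month: return rosters[m]
def pvScanA (tm : String) (d : PySem.Dict String String) : List String → Option String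
  | [] => none
  | k :: rest => if k ≤ tm then d.get? k else pvScanA tm d rest

def find_matching_roster_file (travel_month : String) (available_rosters : List (String × String)) : Option String :=
  if (PySem.Dict.ofList available_rosters).contains travel_month then
    (PySem.Dict.ofList available_rosters).get? travel_month
  else
    match PySem.Str.split? travel_month "-" with
    | some [ys, ms] =>
      match PySem.Int.ofStr? ys, PySem.Int.ofStr? ms with
      | some ty, some tmi =>
        -- A repeats the exact-match check (dead branch, kept literally)
        if (PySem.Dict.ofList available_rosters).contains travel_month then
          (PySem.Dict.ofList available_rosters).get? travel_month
        else if 1 < tmi ∧ (PySem.Dict.ofList available_rosters).contains (pvFmtA ty (tmi - 1)) then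
          (PySem.Dict.ofList available_rosters).get? (pvFmtA ty (tmi - 1))
        else if tmi < 12 ∧ (PySem.Dict.ofList available_rosters).contains (pvFmtA ty (tmi + 1)) then
          (PySem.Dict.ofList available_rosters).get? (pvFmtA ty (tmi + 1))
        else if (PySem.Dict.ofList available_rosters).items ≠ [] then
          match pvScanA travel_month (PySem.Dict.ofList available_rosters)
              (PySem.List.sorted (PySem.Dict.ofList available_rosters).keys (fun x => x) false) with
          | some v => some v
          | none =>
            -- available_rosters[sorted_months[-1]]
            match PySem.List.pyGet? (PySem.List.sorted (PySem.Dict.ofList available_rosters).keys (fun x => x) false) (-1) with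
            | some k => (PySem.Dict.ofList available_rosters).get? k
            | none => none
        else none
      | _, _ => none       -- int() raised: ValueError (outside Pre_)
    | _ => none            -- 'year, month = …' unpacking raised: ValueError (outside Pre_)

-- ===== PORT B =====
-- f'{year}-{month:02d}' ( :02d on an int equals str(m).zfill(2) )
def pvFmtB (y m : Int) : String :=
  PySem.Str.join "" [PySem.Int.toStr y, "-", PySem.Str.zfill (PySem.Int.toStr m) 2]

def find_matching_roster_file_alt (travel_month : String) (available_rosters : List (String × String)) : Option String :=
  match (PySem.Dict.ofList available_rosters).get? travel_month with
  | none =>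
    -- year, month = map(int, travel_month.split('-')): the unpacking raises unless exactly two parts
    if ((PySem.Str.split? travel_month "-").getD []).length = 2 then
      match PySem.Int.ofStr? (((PySem.Str.split? travel_month "-").getD []).getD 0 "") with
      | none => none                                         -- int() raised: ValueError (outside Pre_)
      | some year =>
        match PySem.Int.ofStr? (((PySem.Str.split? travel_month "-").getD []).getD 1 "") with
        | none => none                                       -- int() raised: ValueError (outside Pre_)
        | some month =>
          match (if 1 < month then (PySem.Dict.ofList available_rosters).get? (pvFmtB year (month - 1)) else none) with
          | none =>
            match (if month < 12 then (PySem.Dict.ofList available_rosters).get? (pvFmtB year (month + 1)) else none) with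
            | none =>
              match PySem.List.min? (PySem.Dict.ofList available_rosters).keys (fun x => x) with
              | none => none                                 -- empty dict
              | some lo =>
                if lo ≤ travel_month then (PySem.Dict.ofList available_rosters).get? lo
                else
                  match PySem.List.max? (PySem.Dict.ofList available_rosters).keys (fun x => x) with
                  | none => none
                  | some hi => (PySem.Dict.ofList available_rosters).get? hi
            | some hit => some hit
          | some hit => some hit
    else none                                                -- ValueError (outside Pre_)
  | some hit => some hit

-- ===== PRECONDITION & SPEC =====
-- Pre_ excludes exactly the inputs where A raises ValueError: no exact key match and
-- travel_month does not split on '-' into exactly two int()-parseable parts.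
def Pre_find_matching_roster_file (travel_month : String) (available_rosters : List (String × String)) : Prop :=
  (PySem.Dict.ofList available_rosters).contains travel_month = true ∨
  (((PySem.Str.split? travel_month "-").getD []).length = 2 ∧
   (PySem.Int.ofStr? (((PySem.Str.split? travel_month "-").getD []).getD 0 "")).isSome = true ∧
   (PySem.Int.ofStr? (((PySem.Str.split? travel_month "-").getD []).getD 1 "")).isSome = true)
instance (travel_month : String) (available_rosters : List (String × String)) : Decidable (Pre_find_matching_roster_file travel_month available_rosters) := by unfold Pre_find_matching_roster_file; infer_instance

def pvWitness_find_matching_roster_file : String × (List (String × String)) :=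
  ("2024-05", [("2024-04", "r4.xlsx"), ("2024-01", "r1.xlsx")])

def Spec_find_matching_roster_file (travel_month : String) (available_rosters : List (String × String)) (out : Option String) : Prop := out = find_matching_roster_file_alt travel_month available_rosters
instance (travel_month : String) (available_rosters : List (String × String)) (out : Option String) : Decidable (Spec_find_matching_roster_file travel_month available_rosters out) := by unfold Spec_find_matching_roster_file; infer_instance

-- ===== CLAIM (what is proved, stated in full; the proofs are below) =====
def Claim_equal_find_matching_roster_file : Prop := ∀ (travel_month : String) (available_rosters : List (String × String)), Dom_find_matching_roster_file travel_month available_rosters → Pre_find_matching_roster_file travel_month available_rosters → Spec_find_matching_roster_file travel_month available_rosters (find_matching_roster_file travel_month available_rosters)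

-- ===== LEMMAS AND PROOFS =====

-- the two ports format the near months identically
theorem pvFmt_eq : pvFmtA = pvFmtB := rfl

-- a key of the dict never looks up to `none`
theorem pv_get?_of_mem_keys (d : PySem.Dict String String) (k : String) (hk : k ∈ d.keys) :
    ∃ v, d.get? k = some v := by
  rw [← Option.isSome_iff_exists, ← PySem.Dict.contains_eq_isSome_get?]
  exact (PySem.Dict.contains_iff_mem_keys d k).mpr hk

-- A's scan finds nothing when no key qualifies
theorem pvScanA_none (tm : String) (d : PySem.Dict String String) (l : List String)
    (h : ∀ x ∈ l, ¬ x ≤ tm) : pvScanA tm d l = none := by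
  induction l with
  | nil => rfl
  | cons k rest ih =>
    simp only [pvScanA]
    rw [if_neg (h k (by simp))]
    exact ih (fun x hx => h x (by simp [hx]))

-- head of sorted keys = min? of the keys
theorem pv_head_eq_min (xs : List String) (m : String) (t : List String)
    (h : PySem.List.sorted xs (fun x => x) false = m :: t) :
    PySem.List.min? xs (fun x => x) = some m := by
  have hmem : m ∈ xs := by
    have := PySem.List.mem_sorted (xs := xs) (key := fun x => x) (rev := false) (x := m)
    rw [h] at this; exact this.1 (by simp)
  rcases hx : PySem.List.min? xs (fun x => x) with _ | m0
  · rw [PySem.List.min?_eq_none_iff] at hx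
    subst hx; simp at hmem
  · have h1 : m ≤ m0 := PySem.List.key_head_sorted_le xs (fun x => x) h m0 (PySem.List.min?_mem hx)
    have h2 : m0 ≤ m := PySem.List.min?_isMin hx m hmem
    rw [le_antisymm h2 h1]

-- last of sorted keys = max? of the keys
theorem pv_last_eq_max (xs : List String) (s : List String) (hne : s ≠ [])
    (h : PySem.List.sorted xs (fun x => x) false = s) :
    PySem.List.max? xs (fun x => x) = some (s.getLast hne) := by
  have hmem : s.getLast hne ∈ xs := by
    have := PySem.List.mem_sorted (xs := xs) (key := fun x => x) (rev := false) (x := s.getLast hne)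
    rw [h] at this; exact this.1 (List.getLast_mem hne)
  rcases hx : PySem.List.max? xs (fun x => x) with _ | m0
  · rw [PySem.List.max?_eq_none_iff] at hx
    subst hx; simp at hmem
  · have hm0s : m0 ∈ s := by
      have := PySem.List.mem_sorted (xs := xs) (key := fun x => x) (rev := false) (x := m0)
      rw [h] at this; exact this.2 (PySem.List.max?_mem hx)
    have hpw : s.Pairwise (fun a b => a ≤ b) := by
      rw [← h]; exact PySem.List.sorted_pairwise xs (fun x => x)
    have h1 : m0 ≤ s.getLast hne := by
      rcases List.mem_iff_getElem.mp hm0s with ⟨p, hp, hpe⟩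
      have hlast : s.getLast hne = s[s.length - 1] := List.getLast_eq_getElem hne
      rcases Nat.lt_or_ge p (s.length - 1) with hlt | hge
      · have hle := List.pairwise_iff_getElem.mp hpw p (s.length - 1) (by omega) (by omega) hlt
        rw [hpe] at hle; rw [hlast]; exact hle
      · have hpe' : p = s.length - 1 := by omega
        subst hpe'
        rw [hlast]; exact le_of_eq hpe.symm
    have h2 : s.getLast hne ≤ m0 := PySem.List.max?_isMax hx _ hmem
    rw [le_antisymm h2 h1]

-- A's nonsorting fallback equals B's min/max fallback
theorem pv_fb_eq (tm : String) (d : PySem.Dict String String) :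
    (if d.items ≠ [] then
       match pvScanA tm d (PySem.List.sorted d.keys (fun x => x) false) with
       | some v => some v
       | none =>
         match PySem.List.pyGet? (PySem.List.sorted d.keys (fun x => x) false) (-1) with
         | some k => d.get? k
         | none => none
     else none) =
    (match PySem.List.min? d.keys (fun x => x) with
     | none => none
     | some lo =>
       if lo ≤ tm then d.get? lo
       else
         match PySem.List.max? d.keys (fun x => x) with
         | none => none
         | some hi => d.get? hi) := by
  by_cases hne : d.items = []
  · rw [if_neg (by simp [hne])]
    have hk : d.keys = [] := by simp only [PySem.Dict.keys]; simp [hne]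
    rw [hk]
    rfl
  · rw [if_pos hne]
    have hkne : d.keys ≠ [] := by
      simp only [PySem.Dict.keys]
      simpa using hne
    rcases hs : PySem.List.sorted d.keys (fun x => x) false with _ | ⟨m, t⟩
    · rw [PySem.List.sorted_eq_nil_iff] at hs
      exact absurd hs hkne
    · have hmin := pv_head_eq_min d.keys m t hs
      simp only [hmin]
      by_cases hm : m ≤ tm
      · have hmm : m ∈ d.keys := by
          have := PySem.List.mem_sorted (xs := d.keys) (key := fun x => x) (rev := false) (x := m)
          rw [hs] at this; exact this.1 (by simp)
        obtain ⟨v, hv⟩ := pv_get?_of_mem_keys d m hmm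
        simp only [pvScanA, if_pos hm, hv]
      · have hpw : (m :: t).Pairwise (fun a b => a ≤ b) := by
          rw [← hs]; exact PySem.List.sorted_pairwise d.keys (fun x => x)
        have hall : ∀ x ∈ m :: t, ¬ x ≤ tm := by
          intro x hx hxle
          rcases List.mem_cons.mp hx with rfl | hxt
          · exact hm hxle
          · exact hm (le_trans ((List.pairwise_cons.mp hpw).1 x hxt) hxle)
        have hscan : pvScanA tm d (m :: t) = none := pvScanA_none tm d (m :: t) hall
        have hget : PySem.List.pyGet? (m :: t) (-1) = some ((m :: t).getLast (List.cons_ne_nil m t)) := by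
          have h1 := PySem.List.pyGet?_neg_natCast (m :: t) 1 (by omega) (by simp)
          simp only [Nat.cast_one] at h1
          rw [h1, List.getElem?_eq_getElem (by simp), List.getLast_eq_getElem]
          rfl
        have hmax := pv_last_eq_max d.keys (m :: t) (List.cons_ne_nil m t) hs
        simp only [hscan, if_neg hm, hget, hmax]
-- a near-month guard of A equals the corresponding guard of B, given equal tails
theorem pv_guard_eq (d : PySem.Dict String String) (k : String) (c : Prop) [Decidable c]
    (ta tb : Option String) (h : ta = tb) :
    (if c ∧ d.contains k = true then d.get? k else ta) =
    (match (if c then d.get? k else none) with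
     | none => tb
     | some hit => some hit) := by
  by_cases hcc : c
  · rcases hgk : d.get? k with _ | v
    · have hng : ¬ (c ∧ d.contains k = true) := by
        rintro ⟨-, hct⟩
        rw [PySem.Dict.contains_eq_isSome_get?, hgk] at hct
        simp at hct
      simp only [if_neg hng, if_pos hcc, h]
    · have hct : d.contains k = true := by
        rw [PySem.Dict.contains_eq_isSome_get?, hgk]; rfl
      simp only [if_pos (And.intro hcc hct), if_pos hcc]
  · have hng : ¬ (c ∧ d.contains k = true) := fun hh => hcc hh.1
    simp only [if_neg hng, if_neg hcc, h]

-- ===== VERDICT (by name: the statement is the Claim_ definition above) =====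
theorem find_matching_roster_file_spec : Claim_equal_find_matching_roster_file := by
  intro tm ar _hdom hpre
  unfold Spec_find_matching_roster_file find_matching_roster_file find_matching_roster_file_alt
  set d := PySem.Dict.ofList ar with hd
  by_cases hc : d.contains tm = true
  · obtain ⟨v, hv⟩ := pv_get?_of_mem_keys d tm ((PySem.Dict.contains_iff_mem_keys d tm).mp hc)
    simp only [if_pos hc, hv]
  · have hg : d.get? tm = none := by
      rcases hgg : d.get? tm with _ | v
      · rfl
      · exact absurd (by rw [PySem.Dict.contains_eq_isSome_get?, hgg]; rfl) hc
    obtain ⟨hlen, h0, h1⟩ := hpre.resolve_left hc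
    simp only [if_neg hc, hg]
    have hparts : ∃ ps, PySem.Str.split? tm "-" = some ps := by
      rcases hq : PySem.Str.split? tm "-" with _ | p
      · rw [hq] at hlen; simp at hlen
      · exact ⟨p, rfl⟩
    obtain ⟨parts, hsp⟩ := hparts
    rw [hsp] at hlen h0 h1
    simp only [Option.getD_some] at hlen h0 h1
    simp only [hsp, Option.getD_some]
    rcases parts with _ | ⟨ys, _ | ⟨ms, _ | ⟨z, zs⟩⟩⟩
    · simp at hlen
    · simp at hlen
    · rw [List.getD_cons_zero] at h0
      rw [List.getD_cons_succ, List.getD_cons_zero] at h1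
      obtain ⟨ty, hty⟩ := Option.isSome_iff_exists.mp h0
      obtain ⟨tmi, htmi⟩ := Option.isSome_iff_exists.mp h1
      rw [if_pos (show ([ys, ms].length = 2) by simp)]
      rw [List.getD_cons_zero, List.getD_cons_succ, List.getD_cons_zero]
      simp only [hty, htmi]
      rw [pvFmt_eq]
      exact pv_guard_eq d (pvFmtB ty (tmi - 1)) (1 < tmi) _ _
        (pv_guard_eq d (pvFmtB ty (tmi + 1)) (tmi < 12) _ _ (pv_fb_eq tm d))
    · simp at hlen
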